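-- pv_equiv track=rewrite | github.com/Genentech/dcdfg | data/simulations.py | _is_conservative
-- ===== SOURCE A (Python) =====
-- def _is_conservative(elements, lists):
--     for e in elements:
--         conservative = False
--
--         for list_ in lists:
--             if e not in list_:
--                 conservative = True
--                 break
--         if not conservative:
--             return False
--     return True
-- ===== SOURCE B (Python) =====
-- def _is_conservative(elements, lists):
--     # Intersect all lists once (elements present in every list), then one pass.
--     if not lists:
--         return not elements
--     common = set(lists[0])
--     for lst in lists[1:]:
--         common &= set(lst)
--     return all(e not in common for e in elements)
-- ===== Notes on version B (the rewrite author's own statement) =====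
-- stated objective: faster
-- what changed: Instead of rescanning every list per element with an early break, B builds the set intersection of all lists once and then checks each element against that set in a single pass.
import Mathlib
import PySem

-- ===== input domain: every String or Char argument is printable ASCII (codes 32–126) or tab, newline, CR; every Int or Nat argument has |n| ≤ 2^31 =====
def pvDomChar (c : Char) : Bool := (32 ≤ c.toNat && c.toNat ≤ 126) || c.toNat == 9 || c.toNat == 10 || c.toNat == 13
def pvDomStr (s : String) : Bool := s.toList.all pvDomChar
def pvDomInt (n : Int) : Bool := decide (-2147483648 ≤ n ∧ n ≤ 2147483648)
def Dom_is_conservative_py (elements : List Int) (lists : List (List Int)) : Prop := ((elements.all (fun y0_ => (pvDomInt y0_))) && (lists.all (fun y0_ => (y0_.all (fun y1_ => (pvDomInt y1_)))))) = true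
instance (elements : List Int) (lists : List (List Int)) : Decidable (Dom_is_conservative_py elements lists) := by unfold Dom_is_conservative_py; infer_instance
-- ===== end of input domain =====

-- B builds the intersection of all the lists once, then checks every element in one pass (faster: no per-element rescans).
-- ===== PORT A =====
def pvA_inner (e : Int) : List (List Int) → Bool
  | [] => false
  | l :: rest => if !(l.contains e) then true else pvA_inner e rest

def pvA_outer (lists : List (List Int)) : List Int → Bool
  | [] => true
  | e :: rest => if !(pvA_inner e lists) then false else pvA_outer lists rest

def is_conservative_py (elements : List Int) (lists : List (List Int)) : Bool :=
  pvA_outer lists elements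

-- ===== PORT B =====
def is_conservative_py_alt (elements : List Int) (lists : List (List Int)) : Bool :=
  match lists with
  | [] => elements.isEmpty
  | l0 :: rest =>
    let common : PySem.Set Int :=
      rest.foldl (fun c lst => PySem.Set.inter c (PySem.Set.ofList lst)) (PySem.Set.ofList l0)
    elements.all (fun e => !(PySem.Set.contains common e))

-- ===== PRECONDITION & SPEC =====
def Spec_is_conservative_py (elements : List Int) (lists : List (List Int)) (out : Bool) : Prop := out = is_conservative_py_alt elements lists
instance (elements : List Int) (lists : List (List Int)) (out : Bool) : Decidable (Spec_is_conservative_py elements lists out) := by unfold Spec_is_conservative_py; infer_instance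

-- ===== CLAIM (what is proved, stated in full; the proofs are below) =====
def Claim_equal_is_conservative_py : Prop := ∀ (elements : List Int) (lists : List (List Int)), Dom_is_conservative_py elements lists → Spec_is_conservative_py elements lists (is_conservative_py elements lists)

-- ===== LEMMAS AND PROOFS =====

theorem pvA_inner_eq_any (e : Int) (ls : List (List Int)) :
    pvA_inner e ls = ls.any (fun l => !(l.contains e)) := by
  induction ls with
  | nil => rfl
  | cons l rest ih =>
    simp only [pvA_inner, List.any_cons, ih]
    cases h : l.contains e <;> simp

theorem pvA_outer_eq_all (lists : List (List Int)) (es : List Int) :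
    pvA_outer lists es = es.all (fun e => pvA_inner e lists) := by
  induction es with
  | nil => rfl
  | cons e rest ih =>
    simp only [pvA_outer, List.all_cons, ih]
    cases h : pvA_inner e lists <;> simp

theorem mem_foldl_inter (e : Int) (rest : List (List Int)) (c : PySem.Set Int) :
    (e ∈ rest.foldl (fun c lst => PySem.Set.inter c (PySem.Set.ofList lst)) c) ↔
      e ∈ c ∧ ∀ l ∈ rest, e ∈ l := by
  induction rest generalizing c with
  | nil => simp
  | cons l rest ih =>
    simp only [List.foldl_cons, ih, PySem.Set.mem_inter, PySem.Set.mem_ofList,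
      List.mem_cons]
    constructor
    · rintro ⟨⟨h1, h2⟩, h3⟩
      exact ⟨h1, fun l' hl' => hl'.elim (fun h => h ▸ h2) (h3 l')⟩
    · rintro ⟨h1, h2⟩
      exact ⟨⟨h1, h2 l (Or.inl rfl)⟩, fun l' hl' => h2 l' (Or.inr hl')⟩

-- ===== VERDICT (by name: the statement is the Claim_ definition above) =====
theorem is_conservative_py_spec : Claim_equal_is_conservative_py := by
  intro elements lists _
  unfold Spec_is_conservative_py is_conservative_py is_conservative_py_alt
  rw [pvA_outer_eq_all]
  cases lists with
  | nil =>
    cases elements with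
    | nil => rfl
    | cons e rest => simp [pvA_inner, List.all_cons]
  | cons l0 rest =>
    simp only []
    have hfun : (fun e => pvA_inner e (l0 :: rest)) =
        (fun e => !(PySem.Set.contains
          (rest.foldl (fun c lst => PySem.Set.inter c (PySem.Set.ofList lst))
            (PySem.Set.ofList l0)) e)) := by
      funext e
      rw [pvA_inner_eq_any]
      apply Bool.eq_iff_iff.mpr
      simp only [List.any_eq_true, List.mem_cons, Bool.not_eq_true', List.contains_eq_mem,
        decide_eq_false_iff_not, PySem.Set.contains, mem_foldl_inter, PySem.Set.mem_ofList]
      constructor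
      · rintro ⟨l, hl, hel⟩ ⟨h1, h2⟩
        rcases hl with rfl | hl
        · exact hel h1
        · exact hel (h2 l hl)
      · intro h
        by_cases h0 : e ∈ l0
        · by_cases hr : ∀ l ∈ rest, e ∈ l
          · exact absurd ⟨h0, hr⟩ h
          · push Not at hr
            obtain ⟨l, hl, hel⟩ := hr
            exact ⟨l, Or.inr hl, hel⟩
        · exact ⟨l0, Or.inl rfl, h0⟩
    rw [hfun]
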